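-- pv_equiv track=rewrite | github.com/aggelosnicolaides/p21199 | ask9.py | getMaxLength0
-- ===== SOURCE A (Python) =====
-- def getMaxLength0(arr, n):
--
--    count0 = 0
--
--    result0 = 0
--
--    for i in range(0, n):
--
--       if (arr[i] == "1" or arr[i] ==" "):
--             count0 = 0
--
--       else:
--
--          count0 += 1
--          result0 = max(result0, count0)
--
--    return result0
-- ===== SOURCE B (Python) =====
-- def getMaxLength0(arr, n):
--     best = 0
--     i = 0
--     while i < n:
--         if arr[i] == "1" or arr[i] == " ":
--             i += 1
--         else:
--             j = i + 1
--             while j < n and not (arr[j] == "1" or arr[j] == " "):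
--                 j += 1
--             best = max(best, j - i)
--             i = j
--     return best
-- ===== Notes on version B (the rewrite author's own statement) =====
-- stated objective: alternative
-- what changed: Replaces A's per-element counter/maximum update with a run-partition scheme: an outer loop skips separators and, at each run start, an inner loop finds the run's end so the run length is taken in one piece.
import Mathlib
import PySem

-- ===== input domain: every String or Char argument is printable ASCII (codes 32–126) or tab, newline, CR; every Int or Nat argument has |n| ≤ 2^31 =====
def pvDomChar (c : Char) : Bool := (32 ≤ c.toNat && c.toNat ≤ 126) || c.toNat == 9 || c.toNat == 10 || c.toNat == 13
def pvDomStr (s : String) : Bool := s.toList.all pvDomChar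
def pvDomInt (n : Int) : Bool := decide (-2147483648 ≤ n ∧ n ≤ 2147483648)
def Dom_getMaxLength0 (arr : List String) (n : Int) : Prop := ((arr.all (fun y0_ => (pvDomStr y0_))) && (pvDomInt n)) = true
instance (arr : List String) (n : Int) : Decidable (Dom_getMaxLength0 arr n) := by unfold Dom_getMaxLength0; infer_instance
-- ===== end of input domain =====

-- B is an alternative decomposition of the same O(n) scan: run-partition (outer loop over runs,
-- inner loop to the run end) instead of A's per-element counter/maximum update.

-- ===== PORT A =====
-- A's for-loop over range(0,n) with state (count0, result0), as the obvious recursion on i.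
-- On an out-of-range index Python A raises IndexError (excluded by Pre_); there the port returns the current result.
def getMaxLength0Loop (arr : List String) (n i count0 result0 : Int) : Int :=
  if _h : i < n then
    match PySem.List.pyGet? arr i with
    | some x =>
      if x = "1" ∨ x = " " then
        getMaxLength0Loop arr n (i + 1) 0 result0
      else
        getMaxLength0Loop arr n (i + 1) (count0 + 1) (max result0 (count0 + 1))
    | none => result0
  else result0
termination_by (n - i).toNat
decreasing_by all_goals omega

def getMaxLength0 (arr : List String) (n : Int) : Int :=
  getMaxLength0Loop arr n 0 0 0

-- ===== PORT B =====
-- inner while of Source B: advance j while j < n and arr[j] is not a separator; returns the run end.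
-- (out-of-range index: Python raises, excluded by Pre_; the port stops there)
def altFindEnd (arr : List String) (n j : Int) : Int :=
  if _h : j < n then
    match PySem.List.pyGet? arr j with
    | some x => if x = "1" ∨ x = " " then j else altFindEnd arr n (j + 1)
    | none => j
  else j
termination_by (n - j).toNat
decreasing_by omega

-- used by altLoop's termination proof (the port cites it by name)
theorem altFindEnd_ge (arr : List String) (n j : Int) : j ≤ altFindEnd arr n j := by
  fun_induction altFindEnd <;> omega

-- outer while of Source B over i: skip separators; at a run start take the whole run at once.
def altLoop (arr : List String) (n i best : Int) : Int :=
  if _h : i < n then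
    match PySem.List.pyGet? arr i with
    | some x =>
      if x = "1" ∨ x = " " then
        altLoop arr n (i + 1) best
      else
        let j := altFindEnd arr n (i + 1)
        altLoop arr n j (max best (j - i))
    | none => best
  else best
termination_by (n - i).toNat
decreasing_by
  · omega
  · have := altFindEnd_ge arr n (i + 1)
    omega

def getMaxLength0_alt (arr : List String) (n : Int) : Int :=
  altLoop arr n 0 0

-- ===== PRECONDITION & SPEC =====
-- Pre_ excludes exactly the inputs where A raises IndexError: n beyond the list length
-- (for negative n the range is empty and A returns 0, so those stay inside).
def Pre_getMaxLength0 (arr : List String) (n : Int) : Prop := n ≤ (arr.length : Int)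
instance (arr : List String) (n : Int) : Decidable (Pre_getMaxLength0 arr n) := by unfold Pre_getMaxLength0; infer_instance
def pvWitness_getMaxLength0 : List String × Int := (["a", "1", "b", "c", " ", "d"], 6)

def Spec_getMaxLength0 (arr : List String) (n : Int) (out : Int) : Prop := out = getMaxLength0_alt arr n
instance (arr : List String) (n : Int) (out : Int) : Decidable (Spec_getMaxLength0 arr n out) := by unfold Spec_getMaxLength0; infer_instance

-- ===== CLAIM (what is proved, stated in full; the proofs are below) =====
def Claim_equal_getMaxLength0 : Prop := ∀ (arr : List String) (n : Int), Dom_getMaxLength0 arr n → Pre_getMaxLength0 arr n → Spec_getMaxLength0 arr n (getMaxLength0 arr n)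

-- ===== LEMMAS AND PROOFS =====

-- skipping into a run: altLoop i best = altLoop (findEnd i) (max best (findEnd i - i))
theorem altLoop_findEnd (arr : List String) (n i best : Int)
    (h0 : 0 ≤ i) (hlen : n ≤ (arr.length : Int)) (hb : 0 ≤ best) :
    altLoop arr n i best = altLoop arr n (altFindEnd arr n i) (max best (altFindEnd arr n i - i)) := by
  by_cases h : i < n
  · have hi : i < (arr.length : Int) := lt_of_lt_of_le h hlen
    have hget := PySem.List.pyGet?_eq_some_getElem arr h0 hi
    by_cases hsep : arr[i.toNat] = "1" ∨ arr[i.toNat] = " "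
    · have hfe : altFindEnd arr n i = i := by
        rw [altFindEnd, dif_pos h, hget]
        simp [hsep]
      rw [hfe]
      have : max best (i - i) = best := by omega
      rw [this]
    · have hfe : altFindEnd arr n i = altFindEnd arr n (i + 1) := by
        rw [altFindEnd, dif_pos h, hget]
        simp [hsep]
      rw [hfe]
      conv_lhs => rw [altLoop]
      rw [dif_pos h, hget]
      simp [hsep]
  · have hfe : altFindEnd arr n i = i := by rw [altFindEnd, dif_neg h]
    rw [hfe]
    have : max best (i - i) = best := by omega
    rw [this]

theorem main_inv (arr : List String) (n : Int) (hlen : n ≤ (arr.length : Int)) :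
    ∀ (fuel : Nat) (i c b : Int), (n - i).toNat ≤ fuel → 0 ≤ i → 0 ≤ c → c ≤ b →
    getMaxLength0Loop arr n i c b =
      altLoop arr n (altFindEnd arr n i) (max b (c + (altFindEnd arr n i - i))) := by
  intro fuel
  induction fuel with
  | zero =>
    intro i c b hfuel h0 hc hcb
    have hn : ¬ i < n := by omega
    have hfe : altFindEnd arr n i = i := by rw [altFindEnd, dif_neg hn]
    rw [getMaxLength0Loop, dif_neg hn, hfe, altLoop, dif_neg hn]
    omega
  | succ f ih =>
    intro i c b hfuel h0 hc hcb
    by_cases h : i < n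
    · have hi : i < (arr.length : Int) := lt_of_lt_of_le h hlen
      have hget := PySem.List.pyGet?_eq_some_getElem arr h0 hi
      by_cases hsep : arr[i.toNat] = "1" ∨ arr[i.toNat] = " "
      · -- separator: A resets count; B's findEnd stops here
        have hfe : altFindEnd arr n i = i := by
          rw [altFindEnd, dif_pos h, hget]; simp [hsep]
        rw [getMaxLength0Loop, dif_pos h, hget]
        simp only [hsep, if_pos]
        rw [ih (i + 1) 0 b (by omega) (by omega) le_rfl (by omega)]
        rw [hfe]
        have hb' : max b (c + (i - i)) = b := by omega
        rw [hb']
        conv_rhs => rw [altLoop, dif_pos h, hget]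
        simp only [hsep, if_pos]
        rw [altLoop_findEnd arr n (i + 1) b (by omega) hlen (by omega)]
        congr 1
        omega
      · -- run element: A extends the counter; B's findEnd passes over it
        have hfe : altFindEnd arr n i = altFindEnd arr n (i + 1) := by
          rw [altFindEnd, dif_pos h, hget]; simp [hsep]
        rw [getMaxLength0Loop, dif_pos h, hget]
        simp only [hsep, if_neg, not_false_iff]
        rw [ih (i + 1) (c + 1) (max b (c + 1)) (by omega) (by omega) (by omega) (by omega)]
        rw [hfe]
        have hge := altFindEnd_ge arr n (i + 1)
        congr 1
        omega
    · have hfe : altFindEnd arr n i = i := by rw [altFindEnd, dif_neg h]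
      rw [getMaxLength0Loop, dif_neg h, hfe, altLoop, dif_neg h]
      omega

-- ===== VERDICT (by name: the statement is the Claim_ definition above) =====
theorem getMaxLength0_spec : Claim_equal_getMaxLength0 := by
  intro arr n _ hpre
  unfold Spec_getMaxLength0 getMaxLength0 getMaxLength0_alt
  rw [main_inv arr n hpre n.toNat 0 0 0 (by omega) le_rfl le_rfl le_rfl]
  rw [altLoop_findEnd arr n 0 0 (by omega) hpre (by omega)]
  congr 1
  omega
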